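-- pv_equiv track=rewrite | github.com/eternalclash/PYTHON_ALGORITHM | Programmers/LV2/괄호 변환.py | check
-- ===== SOURCE A (Python) =====
-- def isPalin(p):
--     count=0
--     for i in range(len(p)):
--         if p[i]=="(":
--             count+=1
--         else:
--             if count==0:
--                 return False
--             count -=1
--     return True
--
-- def equal(p):
--     left,right=0,0
--     for i in range(len(p)):
--         if p[i] ==")":
--             right+=1
--         if p[i] =="(":
--             left+=1
--         if left==right:
--             return i
--
-- def check(p):
--     answer=''
--     if p=='':
--         return ''
--     index=equal(p)
--     u=p[:index+1]
--     v=p[index+1:]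
--     if isPalin(u):
--         answer=u+check(v)
--     else:
--         answer="("
--         answer+=check(v)
--         answer+=")"
--         u=list(u[1:-1])
--         for i in range(len(u)):
--             if u[i]=='(':
--                 u[i]=")"
--             else:
--                 u[i]='('
--         answer+= "".join(u)
--     return answer
-- ===== SOURCE B (Python) =====
-- def check(p):
--     # Iterative: one linear segmentation pass (balance counter, index-based),
--     # then assemble prefix pieces in order and suffix pieces in reverse -- O(n).
--     pre = []
--     post = []
--     n = len(p)
--     i = 0
--     while i < n:
--         d = 0          # paren balance: segment ends when it returns to 0
--         c = 0          # nesting counter (any char other than '(' closes)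
--         ok = True
--         j = i
--         while True:
--             ch = p[j]
--             if ch == '(':
--                 d += 1
--                 c += 1
--             else:
--                 if ch == ')':
--                     d -= 1
--                 if c == 0:
--                     ok = False
--                 else:
--                     c -= 1
--             j += 1
--             if d == 0:
--                 break
--         seg = p[i:j]
--         if ok:
--             pre.append(seg)
--         else:
--             pre.append('(')
--             post.append(')' + ''.join('(' if x != '(' else ')' for x in seg[1:-1]))
--         i = j
--     return ''.join(pre) + ''.join(reversed(post))
-- ===== Notes on version B (the rewrite author's own statement) =====
-- stated objective: faster
-- what changed: Replaced the recursive slice-and-concatenate solution by a single iterative linear pass that finds segment boundaries with one balance counter and assembles the answer from prefix pieces in order plus suffix pieces in reverse, with no recursion and no repeated slicing.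
-- outside the precondition, e.g. on check('('): A raises TypeError, B raises IndexError; on check(')'): A raises TypeError, B raises IndexError
import Mathlib
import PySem

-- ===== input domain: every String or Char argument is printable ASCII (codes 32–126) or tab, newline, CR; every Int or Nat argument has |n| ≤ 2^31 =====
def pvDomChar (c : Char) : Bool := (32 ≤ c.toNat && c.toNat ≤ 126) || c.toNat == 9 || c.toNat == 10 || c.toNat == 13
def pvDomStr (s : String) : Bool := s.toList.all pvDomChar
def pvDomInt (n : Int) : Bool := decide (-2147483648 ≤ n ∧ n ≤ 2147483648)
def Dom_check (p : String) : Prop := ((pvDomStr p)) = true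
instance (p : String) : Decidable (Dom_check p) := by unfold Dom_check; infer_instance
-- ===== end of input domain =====

-- B replaces A's recursive slice-and-concatenate transform by one iterative linear
-- segmentation pass assembling prefix pieces in order and suffix pieces in reverse (faster).


-- ===== PORT A =====
-- isPalin: early-False scan with a counter (any char other than '(' closes)
def isPalinA : List Char → Int → Bool
  | [], _ => true
  | ch :: rest, count =>
    if ch = '(' then isPalinA rest (count + 1)
    else if count = 0 then false
    else isPalinA rest (count - 1)

-- equal: index of the first position where #'(' = #')' in the prefix (None otherwise)
def equalA : List Char → Int → Int → Nat → Option Nat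
  | [], _, _, _ => none
  | ch :: rest, left, right, i =>
    let right := if ch = ')' then right + 1 else right
    let left := if ch = '(' then left + 1 else left
    if left = right then some i else equalA rest left right (i + 1)

-- the index-loop flipping each bracket of u
def flipA (c : Char) : Char := if c = '(' then ')' else '('

def checkA (p : List Char) : List Char :=
  if hp : p = [] then []
  else
    match equalA p 0 0 0 with
    | none => []   -- Python raises TypeError here (p[:None+1]); excluded by Pre_check
    | some index =>
      let u := p.take (index + 1)
      let v := p.drop (index + 1)
      if isPalinA u 0 then u ++ checkA v
      else '(' :: checkA v ++ ')' :: (PySem.List.slice u (some 1) (some (-1))).map flipA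
termination_by p.length
decreasing_by
  all_goals
    have hlen := List.length_pos_iff.mpr hp
    simp; omega

def check (p : String) : String := String.ofList (checkA p.toList)

-- ===== PORT B =====
def flipB (c : Char) : Char := if c ≠ '(' then '(' else ')'

-- inner while loop: consume one segment (until the balance d returns to 0)
def segB : List Char → Int → Int → Bool → List Char → (List Char × Bool × List Char)
  | [], _, _, ok, acc => (acc.reverse, ok, [])  -- Python raises IndexError here; excluded by Pre_check
  | ch :: rest, d, c, ok, acc =>
    if ch = '(' then
      if d + 1 = 0 then ((ch :: acc).reverse, ok, rest)
      else segB rest (d + 1) (c + 1) ok (ch :: acc)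
    else
      let d' := if ch = ')' then d - 1 else d
      let ok' := if c = 0 then false else ok
      let c' := if c = 0 then c else c - 1
      if d' = 0 then ((ch :: acc).reverse, ok', rest)
      else segB rest d' c' ok' (ch :: acc)

-- helper lemma used by loopB's termination (cited by name in decreasing_by)
theorem segB_rest_lt (l : List Char) (d c : Int) (ok : Bool) (acc : List Char)
    (h : l ≠ []) : (segB l d c ok acc).2.2.length < l.length := by
  induction l generalizing d c ok acc with
  | nil => exact absurd rfl h
  | cons ch rest ih =>
    have hrec : ∀ d c ok acc, (segB rest d c ok acc).2.2.length < (ch :: rest).length := by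
      intro d c ok acc
      by_cases hr : rest = []
      · subst hr; simp [segB]
      · exact (ih d c ok acc hr).trans (by simp)
    simp only [segB]
    split_ifs <;> exact Nat.lt_succ_iff.mp (by simpa using hrec _ _ _ _)

-- outer while loop: pre pieces joined in order, post pieces joined reversed
def loopB : List Char → List (List Char) → List (List Char) → List Char
  | [], pre, post => pre.flatten ++ post.reverse.flatten
  | ch :: tl, pre, post =>
    let r := segB (ch :: tl) 0 0 true []   -- seg = r.1, ok = r.2.1, rest = r.2.2
    if r.2.1 then loopB r.2.2 (pre ++ [r.1]) post
    else loopB r.2.2 (pre ++ [['(']])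
          (post ++ [')' :: (PySem.List.slice r.1 (some 1) (some (-1))).map flipB])
termination_by p => p.length
decreasing_by
  all_goals exact segB_rest_lt (ch :: tl) 0 0 true [] (by simp)

def check_alt (p : String) : String := String.ofList (loopB p.toList [] [])

-- ===== PRECONDITION & SPEC =====
-- Pre_check: exactly the inputs with equally many '(' and ')' — on all others Python A
-- raises a TypeError (equal() returns None and A computes p[:None+1]).
def Pre_check (p : String) : Prop := p.toList.count '(' = p.toList.count ')'
instance (p : String) : Decidable (Pre_check p) := by unfold Pre_check; infer_instance

def pvWitness_check : String := "(())()"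

def Spec_check (p : String) (out : String) : Prop := out = check_alt p
instance (p : String) (out : String) : Decidable (Spec_check p out) := by unfold Spec_check; infer_instance

-- ===== CLAIM (what is proved, stated in full; the proofs are below) =====
def Claim_equal_check : Prop := ∀ (p : String), Dom_check p → Pre_check p → Spec_check p (check p)

-- ===== LEMMAS AND PROOFS =====

-- paren balance of a list (#'(' - #')')
def balInt (l : List Char) : Int := (l.count '(' : Int) - (l.count ')' : Int)

def stepd (d : Int) (ch : Char) : Int :=
  if ch = '(' then d + 1 else if ch = ')' then d - 1 else d

-- number of chars (>= 1) consumed until the running balance first returns to 0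
def firstBal : List Char → Int → Option Nat
  | [], _ => none
  | ch :: r, d => if stepd d ch = 0 then some 1 else (firstBal r (stepd d ch)).map (· + 1)

-- B's ok-flag threading, as a standalone scan
def palinAcc : List Char → Int → Bool → Bool
  | [], _, ok => ok
  | ch :: r, c, ok =>
    if ch = '(' then palinAcc r (c + 1) ok
    else if c = 0 then palinAcc r c false
    else palinAcc r (c - 1) ok

theorem balInt_cons (ch : Char) (r : List Char) (d : Int) :
    d + balInt (ch :: r) = stepd d ch + balInt r := by
  by_cases h1 : ch = '(' <;> by_cases h2 : ch = ')' <;>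
    simp_all [balInt, stepd] <;> ring

theorem balInt_append (a b : List Char) : balInt (a ++ b) = balInt a + balInt b := by
  simp [balInt, List.count_append]; ring

theorem equalA_eq (l : List Char) : ∀ (left right : Int) (i : Nat),
    equalA l left right i = (firstBal l (left - right)).map (fun k => i + k - 1) := by
  induction l with
  | nil => intro left right i; simp [equalA, firstBal]
  | cons ch r ih =>
    intro left right i
    simp only [equalA, firstBal]
    have hd : (if ch = '(' then left + 1 else left) - (if ch = ')' then right + 1 else right)
        = stepd (left - right) ch := by
      by_cases h1 : ch = '('
      · simp [stepd, h1]; ring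
      · by_cases h2 : ch = ')'
        · simp [stepd, h2]; ring
        · simp [stepd, h1, h2]
    by_cases hz : stepd (left - right) ch = 0
    · rw [if_pos (by omega), if_pos hz]; simp
    · rw [if_neg (by omega), if_neg hz, ih, hd]
      cases firstBal r (stepd (left - right) ch) <;> simp

theorem firstBal_some (l : List Char) : ∀ (d : Int) (k : Nat), firstBal l d = some k →
    1 ≤ k ∧ k ≤ l.length ∧ d + balInt (l.take k) = 0 := by
  induction l with
  | nil => intro d k h; simp [firstBal] at h
  | cons ch r ih =>
    intro d k h
    simp only [firstBal] at h
    split_ifs at h with hz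
    · obtain rfl : k = 1 := by simpa using h.symm
      refine ⟨le_refl 1, by simp, ?_⟩
      have h0 := balInt_cons ch [] d
      simp only [List.take_succ_cons, List.take_zero]
      rw [h0]; simpa [balInt] using hz
    · cases hf : firstBal r (stepd d ch) with
      | none => rw [hf] at h; simp at h
      | some k' =>
        rw [hf] at h
        obtain rfl : k = k' + 1 := by simpa using h.symm
        obtain ⟨ha, hb, hc⟩ := ih (stepd d ch) k' hf
        refine ⟨by omega, by simpa using hb, ?_⟩
        rw [show (ch :: r).take (k' + 1) = ch :: r.take k' by simp]
        rw [balInt_cons ch (r.take k') d]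
        exact hc

theorem firstBal_exists (l : List Char) : ∀ (d : Int), l ≠ [] → d + balInt l = 0 →
    ∃ k, firstBal l d = some k := by
  induction l with
  | nil => intro d h; exact absurd rfl h
  | cons ch r ih =>
    intro d _ hbal
    simp only [firstBal]
    by_cases hz : stepd d ch = 0
    · exact ⟨1, by rw [if_pos hz]⟩
    · rw [if_neg hz]
      have hbal' : stepd d ch + balInt r = 0 := by rw [← balInt_cons]; exact hbal
      have hr : r ≠ [] := by
        intro hnil; subst hnil; simp [balInt] at hbal'; exact hz (by omega)
      obtain ⟨k, hk⟩ := ih (stepd d ch) hr hbal'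
      exact ⟨k + 1, by rw [hk]; rfl⟩

theorem palinAcc_false (u : List Char) : ∀ c, palinAcc u c false = false := by
  induction u with
  | nil => intro c; rfl
  | cons ch r ih => intro c; simp only [palinAcc]; split_ifs <;> exact ih _

theorem isPalinA_eq (u : List Char) : ∀ c, isPalinA u c = palinAcc u c true := by
  induction u with
  | nil => intro c; rfl
  | cons ch r ih =>
    intro c
    simp only [isPalinA, palinAcc]
    split_ifs with h1 h2
    · exact ih _
    · exact (palinAcc_false r c).symm
    · exact ih _

theorem flip_eq : flipA = flipB := by
  funext c; by_cases h : c = '(' <;> simp [flipA, flipB, h]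

theorem segB_eq (l : List Char) : ∀ (d : Int) (k : Nat), firstBal l d = some k →
    ∀ (c : Int) (ok : Bool) (acc : List Char),
      segB l d c ok acc = (acc.reverse ++ l.take k, palinAcc (l.take k) c ok, l.drop k) := by
  induction l with
  | nil => intro d k h; simp [firstBal] at h
  | cons ch r ih =>
    intro d k h c ok acc
    simp only [firstBal] at h
    by_cases h1 : ch = '('
    · rw [show stepd d ch = d + 1 by simp [stepd, h1]] at h
      simp only [segB, if_pos h1]
      by_cases hz : d + 1 = 0
      · rw [if_pos hz] at h ⊢
        obtain rfl : k = 1 := by simpa using h.symm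
        simp [palinAcc, h1]
      · rw [if_neg hz] at h ⊢
        cases hf : firstBal r (d + 1) with
        | none => rw [hf] at h; simp at h
        | some k' =>
          rw [hf] at h
          obtain rfl : k = k' + 1 := by simpa using h.symm
          rw [ih (d + 1) k' hf (c + 1) ok (ch :: acc)]
          simp [palinAcc, h1]
    · rw [show stepd d ch = (if ch = ')' then d - 1 else d) by simp [stepd, h1]] at h
      simp only [segB, if_neg h1]
      by_cases hz : (if ch = ')' then d - 1 else d) = 0
      · rw [if_pos hz] at h
        rw [if_pos hz]
        obtain rfl : k = 1 := by simpa using h.symm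
        by_cases hc : c = 0 <;> simp [palinAcc, h1, hc]
      · rw [if_neg hz] at h
        rw [if_neg hz]
        cases hf : firstBal r (if ch = ')' then d - 1 else d) with
        | none => rw [hf] at h; simp at h
        | some k' =>
          rw [hf] at h
          obtain rfl : k = k' + 1 := by simpa using h.symm
          by_cases hc : c = 0
          · simp only [if_pos hc]
            rw [ih _ k' hf c false (ch :: acc)]
            simp [palinAcc, h1, hc]
          · simp only [if_neg hc]
            rw [ih _ k' hf (c - 1) ok (ch :: acc)]
            simp [palinAcc, h1, hc]

-- hoisting the accumulators out of loopB
theorem loopB_shift_aux (n : Nat) : ∀ (l : List Char), l.length = n →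
    ∀ (pre post : List (List Char)),
      loopB l pre post = pre.flatten ++ loopB l [] [] ++ post.reverse.flatten := by
  induction n using Nat.strong_induction_on with
  | _ n ih =>
    intro l hl pre post
    cases l with
    | nil => simp [loopB]
    | cons ch tl =>
      rcases hseg : segB (ch :: tl) 0 0 true [] with ⟨seg, ok, rest⟩
      have hrest : rest.length < n := by
        have hx := segB_rest_lt (ch :: tl) 0 0 true [] (by simp)
        rw [hseg] at hx
        have hx' : rest.length < (ch :: tl).length := hx
        simp at hx'
        have hl' : tl.length + 1 = n := by simpa using hl
        omega
      simp only [loopB, hseg, List.nil_append]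
      cases ok with
      | true =>
        rw [if_pos rfl, if_pos rfl,
            ih rest.length (by omega) rest rfl (pre ++ [seg]) post,
            ih rest.length (by omega) rest rfl [seg] []]
        simp [List.flatten_append]
      | false =>
        rw [if_neg (by simp), if_neg (by simp),
            ih rest.length (by omega) rest rfl (pre ++ [['(']])
              (post ++ [')' :: (PySem.List.slice seg (some 1) (some (-1))).map flipB]),
            ih rest.length (by omega) rest rfl [['(']]
              ([')' :: (PySem.List.slice seg (some 1) (some (-1))).map flipB])]
        simp [List.flatten_append]

theorem loopB_shift (l : List Char) (pre post : List (List Char)) :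
    loopB l pre post = pre.flatten ++ loopB l [] [] ++ post.reverse.flatten :=
  loopB_shift_aux l.length l rfl pre post

theorem checkA_eq_aux (n : Nat) : ∀ (l : List Char), l.length = n → balInt l = 0 →
    checkA l = loopB l [] [] := by
  induction n using Nat.strong_induction_on with
  | _ n ih =>
    intro l hl h
    by_cases hnil : l = []
    · subst hnil; simp [checkA, loopB]
    · obtain ⟨k, hk⟩ := firstBal_exists l 0 hnil (by omega)
      obtain ⟨hk1, hk2, hk3⟩ := firstBal_some l 0 k hk
      have he : equalA l 0 0 0 = some (k - 1) := by
        rw [equalA_eq, show (0 : Int) - 0 = 0 by ring, hk]; simp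
      have hku : k - 1 + 1 = k := by omega
      have hbu : balInt (l.take k) = 0 := by omega
      have hbv : balInt (l.drop k) = 0 := by
        have := balInt_append (l.take k) (l.drop k)
        rw [List.take_append_drop] at this
        omega
      have hvlt : (l.drop k).length < n := by
        have : l.length > 0 := List.length_pos_iff.mpr hnil
        simp only [List.length_drop]
        omega
      obtain ⟨ch, tl, rfl⟩ := List.exists_cons_of_ne_nil hnil
      have hseg := segB_eq (ch :: tl) 0 k hk 0 true []
      rw [checkA, dif_neg hnil, he]
      simp only [loopB, hseg, hku]
      simp only [List.reverse_nil, List.nil_append]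
      rw [← isPalinA_eq]
      cases hpal : isPalinA ((ch :: tl).take k) 0 with
      | true =>
        rw [if_pos rfl,
            loopB_shift ((ch :: tl).drop k) [(ch :: tl).take k] [],
            ih (((ch :: tl).drop k)).length (by omega) _ rfl hbv]
        simp
      | false =>
        rw [if_neg (by simp),
            loopB_shift ((ch :: tl).drop k) [['(']] _,
            ih (((ch :: tl).drop k)).length (by omega) _ rfl hbv]
        simp [flip_eq]

-- ===== VERDICT (by name: the statement is the Claim_ definition above) =====
theorem check_spec : Claim_equal_check := by
  unfold Claim_equal_check Spec_check check check_alt Pre_check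
  intro p _ hpre
  have : balInt p.toList = 0 := by unfold balInt; omega
  rw [checkA_eq_aux p.toList.length p.toList rfl this]
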